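-- pv_equiv track=rewrite | github.com/Tanushree713/BasicsInPython | Stack.py | makeGreatStr
-- ===== SOURCE A (Python) =====
-- def makeGreatStr(s):
--   stack = []
--   if not s :
--       return ""
--
--   for char in s :
--       if stack and abs(ord(char) - ord(stack[-1])) == 32 :
--           stack.pop()
--       else:
--           stack.append(char)
--   return ''.join(stack)
-- ===== SOURCE B (Python) =====
-- def makeGreatStr(s):
--     if not s:
--         return ""
--     while True:
--         found = -1
--         for i in range(len(s) - 1):
--             if abs(ord(s[i]) - ord(s[i + 1])) == 32:
--                 found = i
--                 break
--         if found == -1: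
--             return s
--         s = s[:found] + s[found + 2:]
-- ===== Notes on version B (the rewrite author's own statement) =====
-- stated objective: alternative
-- what changed: Replaces the one-pass stack with repeated scanning: find the leftmost adjacent case-pair, delete it, and restart until no pair remains (same normal form as the stack's leftmost-innermost reduction).
import Mathlib
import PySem

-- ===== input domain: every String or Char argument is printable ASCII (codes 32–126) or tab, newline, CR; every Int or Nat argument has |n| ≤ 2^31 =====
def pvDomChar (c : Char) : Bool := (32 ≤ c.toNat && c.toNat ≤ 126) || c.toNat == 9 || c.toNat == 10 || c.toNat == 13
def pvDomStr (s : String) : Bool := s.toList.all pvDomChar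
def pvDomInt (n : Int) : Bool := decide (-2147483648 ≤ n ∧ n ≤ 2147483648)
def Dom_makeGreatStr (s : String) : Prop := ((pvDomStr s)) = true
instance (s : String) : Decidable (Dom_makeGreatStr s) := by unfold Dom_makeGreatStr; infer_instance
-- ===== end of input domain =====

-- B replaces the stack with repeated delete-the-leftmost-adjacent-case-pair scans (alternative algorithm, not faster).

-- abs(ord a - ord b) == 32
def pvPair (a b : Char) : Bool := ((a.toNat : Int) - (b.toNat : Int)).natAbs == 32

-- ===== PORT A =====
-- the loop body: stack kept head-first (head = Python stack[-1])
def pvStep (st : List Char) (c : Char) : List Char :=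
  match st with
  | [] => [c]
  | d :: t => if pvPair c d then t else c :: st

def makeGreatStr (s : String) : String :=
  if s.toList = [] then ""
  else String.mk ((s.toList.foldl pvStep []).reverse)

-- ===== PORT B =====
-- inner scan: find the leftmost adjacent pair and return the string with it deleted (none = no pair)
def pvReduceOnce : List Char → Option (List Char)
  | a :: b :: t => if pvPair a b then some t else (pvReduceOnce (b :: t)).map (a :: ·)
  | _ => none

theorem pvReduceOnce_length : ∀ {l l' : List Char}, pvReduceOnce l = some l' → l'.length < l.length := by
  intro l
  induction l with
  | nil => intro l' h; simp [pvReduceOnce] at h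
  | cons a t ih =>
    intro l' h
    cases t with
    | nil => simp [pvReduceOnce] at h
    | cons b t' =>
      simp only [pvReduceOnce] at h
      split at h
      · cases h; simp
      · simp only [Option.map_eq_some_iff] at h
        obtain ⟨r, hr, rfl⟩ := h
        have := ih hr
        simp only [List.length_cons] at this ⊢
        omega

-- the outer while loop: reduce until no pair remains
def pvReduceAll (l : List Char) : List Char :=
  match h : pvReduceOnce l with
  | none => l
  | some l' => pvReduceAll l'
termination_by l.length
decreasing_by exact pvReduceOnce_length h

def makeGreatStr_alt (s : String) : String :=
  if s.toList = [] then ""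
  else String.mk (pvReduceAll s.toList)

-- ===== PRECONDITION & SPEC =====
def Spec_makeGreatStr (s : String) (out : String) : Prop := out = makeGreatStr_alt s
instance (s : String) (out : String) : Decidable (Spec_makeGreatStr s out) := by unfold Spec_makeGreatStr; infer_instance

-- ===== CLAIM (what is proved, stated in full; the proofs are below) =====
def Claim_equal_makeGreatStr : Prop := ∀ (s : String), Dom_makeGreatStr s → Spec_makeGreatStr s (makeGreatStr s)

-- ===== LEMMAS AND PROOFS =====

-- boundary condition: the next char (if any) does not pair with the stack top (if any)
def pvOk (st l : List Char) : Prop :=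
  ∀ a ∈ l.head?, ∀ d ∈ st.head?, pvPair a d = false

theorem pvPair_symm (a b : Char) : pvPair a b = pvPair b a := by
  simp only [pvPair]
  rw [← Int.natAbs_neg, neg_sub]

-- a pair-free list is just pushed onto the stack
theorem pv_foldl_chain : ∀ (l st : List Char), pvReduceOnce l = none → pvOk st l →
    l.foldl pvStep st = l.reverse ++ st := by
  intro l
  induction l with
  | nil => intro st _ _; simp
  | cons a t ih =>
    intro st hnone hok
    have hstep : pvStep st a = a :: st := by
      cases st with
      | nil => rfl
      | cons d st' =>
        have := hok a (by simp) d (by simp)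
        simp [pvStep, this]
    have hnone' : pvReduceOnce t = none := by
      cases t with
      | nil => rfl
      | cons b t' =>
        simp only [pvReduceOnce] at hnone
        split at hnone
        · exact absurd hnone (by simp)
        · simpa using hnone
    have hok' : pvOk (a :: st) t := by
      intro x hx d hd
      simp at hd; subst hd
      cases t with
      | nil => simp at hx
      | cons b t' =>
        simp at hx; subst hx
        simp only [pvReduceOnce] at hnone
        split at hnone
        · exact absurd hnone (by simp)
        · rename_i hpair
          rw [pvPair_symm]; simpa using hpair
    simp only [List.foldl_cons, hstep, ih (a :: st) hnone' hok', List.reverse_cons]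
    simp

-- deleting the leftmost pair does not change the fold, provided the boundary is clean
theorem pv_foldl_reduceOnce : ∀ (l l' st : List Char), pvReduceOnce l = some l' → pvOk st l →
    l.foldl pvStep st = l'.foldl pvStep st := by
  intro l
  induction l with
  | nil => intro l' st h; simp [pvReduceOnce] at h
  | cons a t ih =>
    intro l' st h hok
    cases t with
    | nil => simp [pvReduceOnce] at h
    | cons b t' =>
      have hstep : pvStep st a = a :: st := by
        cases st with
        | nil => rfl
        | cons d st' =>
          have := hok a (by simp) d (by simp)
          simp [pvStep, this]
      simp only [pvReduceOnce] at h
      split at h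
      · rename_i hpair
        cases h
        have hpop : pvStep (a :: st) b = st := by
          simp [pvStep, pvPair_symm b a, hpair]
        simp [List.foldl_cons, hstep, hpop]
      · rename_i hpair
        simp only [Option.map_eq_some_iff] at h
        obtain ⟨r, hr, rfl⟩ := h
        have hok' : pvOk (a :: st) (b :: t') := by
          intro x hx d hd
          simp at hx hd; subst hx; subst hd
          rw [pvPair_symm]; simpa using hpair
        simp only [List.foldl_cons, hstep]
        exact ih r (a :: st) hr hok'

-- the stack fold computes the repeated-deletion normal form
theorem pv_main : ∀ (l : List Char), (l.foldl pvStep []).reverse = pvReduceAll l := by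
  intro l
  induction hl : l.length using Nat.strong_induction_on generalizing l with
  | _ n ih =>
    subst hl
    unfold pvReduceAll
    split
    · rename_i hnone
      rw [pv_foldl_chain l [] hnone (by intro a ha d hd; simp at hd)]
      simp
    · rename_i l' hsome
      rw [pv_foldl_reduceOnce l l' [] hsome (by intro a ha d hd; simp at hd)]
      exact ih l'.length (pvReduceOnce_length hsome) l' rfl

-- ===== VERDICT (by name: the statement is the Claim_ definition above) =====
theorem makeGreatStr_spec : Claim_equal_makeGreatStr := by
  intro s _
  unfold Spec_makeGreatStr makeGreatStr makeGreatStr_alt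
  split
  · rfl
  · rw [pv_main]
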